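-- pv_equiv track=rewrite | github.com/waanan/compiler | chapter3/c2_simple.py | cal_liveness
-- ===== SOURCE A (Python) =====
-- def cal_liveness(op_lst):
--     live_set = set()
--     live_after_lst = [live_set]
--     for op in op_lst[:0:-1]:
--         new_live_set = live_set.copy()
--         if op[0] == "addq":
--             add_exp1 = op[1]
--             add_exp2 = op[2]
--             if add_exp1[0] == "var":
--                 new_live_set.add(add_exp1[1])
--             if add_exp2[0] == "var":
--                 new_live_set.add(add_exp2[1])
--         elif op[0] == "movq":
--             from_exp = op[1]
--             to_exp = op[2]
--             if from_exp[0] == "var":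
--                 new_live_set.add(from_exp[1])
--             if to_exp[0] == "var":
--                 new_live_set.discard(to_exp[1])
--         live_set = new_live_set
--         live_after_lst.append(live_set)
--     live_after_lst.reverse()
--     return live_after_lst
-- ===== SOURCE B (Python) =====
-- def _gen_kill(op):
--     # Stage 1 helper: compile one instruction into an explicit (gen, kill) transfer.
--     kind, e1, e2 = op
--     srcs = (e1, e2) if kind == "addq" else (e1,) if kind == "movq" else ()
--     gen = [e[1] for e in srcs if e[0] == "var"]
--     kill = [e2[1]] if kind == "movq" and e2[0] == "var" else []
--     return gen, kill
--
--
-- def _chain(transfers):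
--     # Stage 2: fold-right over the transfer list, consing results front-to-back.
--     if not transfers:
--         return [set()]
--     gen, kill = transfers[0]
--     rest = _chain(transfers[1:])
--     return [(rest[0] | set(gen)) - set(kill)] + rest
--
--
-- def cal_liveness(op_lst):
--     return _chain([_gen_kill(op) for op in op_lst[1:]])
-- ===== Notes on version B (the rewrite author's own statement) =====
-- stated objective: alternative
-- what changed: A walks the reversed instruction list mutating a copied running set per branch, appending snapshots and reversing at the end; B is two stages: a forward pass compiles each instruction into an explicit (gen, kill) transfer pair, then a structural fold-right recursion consumes the transfer list, consing (live | gen) - kill results front-to-back with no mutation, append or reverse.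
import Mathlib
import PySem

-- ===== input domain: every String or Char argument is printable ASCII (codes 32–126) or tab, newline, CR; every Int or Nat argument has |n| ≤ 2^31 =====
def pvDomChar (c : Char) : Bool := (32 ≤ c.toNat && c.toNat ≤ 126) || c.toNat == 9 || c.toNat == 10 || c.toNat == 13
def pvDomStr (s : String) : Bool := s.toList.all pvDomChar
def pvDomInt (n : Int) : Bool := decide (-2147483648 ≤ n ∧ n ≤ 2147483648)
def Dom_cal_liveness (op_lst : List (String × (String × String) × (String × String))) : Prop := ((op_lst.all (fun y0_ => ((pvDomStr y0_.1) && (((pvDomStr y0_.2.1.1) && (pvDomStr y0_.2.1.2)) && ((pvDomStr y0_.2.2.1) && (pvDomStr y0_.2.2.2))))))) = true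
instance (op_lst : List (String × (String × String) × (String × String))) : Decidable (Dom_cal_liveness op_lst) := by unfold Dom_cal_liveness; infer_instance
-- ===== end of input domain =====

-- B replaces A's reversed copy-mutate-append-reverse loop by two stages: a
-- forward pass compiling each op into an explicit (gen, kill) transfer, then a
-- structural fold-right recursion consing results front-to-back
-- (objective: alternative decomposition, same cost).

-- ===== PORT A =====
-- loop body of A's 'for op in op_lst[:0:-1]' as a named helper (state = (live_set, live_after_lst))
def stepA (st : List String × List (List String)) (op : String × (String × String) × (String × String)) :
    List String × List (List String) :=
  let live_set := st.1
  let new_live_set := live_set                      -- live_set.copy()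
  let new_live_set :=
    if op.1 == "addq" then
      let add_exp1 := op.2.1
      let add_exp2 := op.2.2
      let s1 := if add_exp1.1 == "var" then PySem.Set.add new_live_set add_exp1.2 else new_live_set
      if add_exp2.1 == "var" then PySem.Set.add s1 add_exp2.2 else s1
    else if op.1 == "movq" then
      let from_exp := op.2.1
      let to_exp := op.2.2
      let s1 := if from_exp.1 == "var" then PySem.Set.add new_live_set from_exp.2 else new_live_set
      if to_exp.1 == "var" then PySem.Set.discard s1 to_exp.2 else s1
    else new_live_set
  (new_live_set, st.2 ++ [new_live_set])

def cal_liveness (op_lst : List (String × (String × String) × (String × String))) : List (List String) :=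
  let live_set : List String := PySem.Set.empty
  let live_after_lst : List (List String) := [live_set]
  let res := ((PySem.List.slice? op_lst none (some 0) (-1)).getD []).foldl stepA (live_set, live_after_lst)
  res.2.reverse

-- ===== PORT B =====
-- _gen_kill(op) from Source B: compile one instruction into a (gen, kill) pair
def genKill (op : String × (String × String) × (String × String)) : List String × List String :=
  let srcs := if op.1 == "addq" then [op.2.1, op.2.2] else if op.1 == "movq" then [op.2.1] else []
  let gen := (srcs.filter (fun e => e.1 == "var")).map (fun e => e.2)
  let kill := if op.1 == "movq" && op.2.2.1 == "var" then [op.2.2.2] else []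
  (gen, kill)

-- _chain(transfers) from Source B: fold-right recursion consing front-to-back
-- (rest[0] is total in Source B since _chain never returns []; ported as headD)
def chain : List (List String × List String) → List (List String)
  | [] => [PySem.Set.empty]
  | (gen, kill) :: ts =>
    let rest := chain ts
    PySem.Set.diff (PySem.Set.union (rest.headD PySem.Set.empty) (PySem.Set.ofList gen)) (PySem.Set.ofList kill) :: rest

def cal_liveness_alt (op_lst : List (String × (String × String) × (String × String))) : List (List String) :=
  chain ((PySem.List.slice op_lst (some 1) none).map genKill)

-- ===== PRECONDITION & SPEC =====
def Spec_cal_liveness (op_lst : List (String × (String × String) × (String × String))) (out : List (List String)) : Prop := out = cal_liveness_alt op_lst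
instance (op_lst : List (String × (String × String) × (String × String))) (out : List (List String)) : Decidable (Spec_cal_liveness op_lst out) := by unfold Spec_cal_liveness; infer_instance

-- ===== CLAIM (what is proved, stated in full; the proofs are below) =====
def Claim_equal_cal_liveness : Prop := ∀ (op_lst : List (String × (String × String) × (String × String))), Dom_cal_liveness op_lst → Spec_cal_liveness op_lst (cal_liveness op_lst)

-- ===== LEMMAS AND PROOFS =====

-- op_lst[:0:-1] is the reverse of op_lst[1:]
theorem slice_rev_tail {α : Type} (xs : List α) :
    PySem.List.slice? xs none (some 0) (-1) = some xs.tail.reverse := by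
  cases xs with
  | nil => rfl
  | cons x t =>
    unfold PySem.List.slice? PySem.List.sliceIndices
    simp only [List.length_cons]
    norm_num
    have hif : (if 0 < t.length then t.length else 0) = t.length := by split <;> omega
    rw [hif]
    apply List.ext_getElem
    · simp
    · intro k hk1 hk2
      simp only [List.getElem_map, List.getElem_range, List.getElem_reverse]
      simp at hk1
      have h1 : ((t.length : Int) + -(k : Int)).toNat = t.length - k := by omega
      simp only [h1]
      rw [List.getElem_cons]
      split
      · omega
      · congr 1
        omega

-- B's transfer for op, as one function of op and live
def transB (op : String × (String × String) × (String × String)) (live : List String) : List String :=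
  PySem.Set.diff (PySem.Set.union live (PySem.Set.ofList (genKill op).1)) (PySem.Set.ofList (genKill op).2)

-- the shared reference: liveRef rest = the list of live-after sets for op_lst = op0 :: rest
def liveRef : List (String × (String × String) × (String × String)) → List (List String)
  | [] => [[]]
  | op :: rest => transB op ((liveRef rest).headD []) :: liveRef rest

theorem diff_singleton (s : List String) (x : String) : PySem.Set.diff s [x] = PySem.Set.discard s x := by
  simp [PySem.Set.diff, PySem.Set.discard]
  apply List.filter_congr
  intro a _
  simp [beq_eq_decide]

theorem diff_nil (s : List String) : PySem.Set.diff s [] = s := by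
  simp [PySem.Set.diff]

-- A's branch-and-mutate loop body computes exactly B's (gen, kill) transfer
theorem stepA_eq (op : String × (String × String) × (String × String)) (st : List String × List (List String)) :
    stepA st op = (transB op st.1, st.2 ++ [transB op st.1]) := by
  obtain ⟨k, ⟨a1, b1⟩, ⟨a2, b2⟩⟩ := op
  unfold stepA transB genKill
  by_cases hk : k = "addq"
  · subst hk
    simp only [beq_iff_eq, reduceIte]
    by_cases h1 : a1 = "var" <;> by_cases h2 : a2 = "var" <;> by_cases h12 : b2 = b1 <;>
      by_cases hb1 : b1 ∈ st.1 <;> by_cases hb2 : b2 ∈ st.1 <;>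
      simp_all [diff_nil, PySem.Set.union, PySem.Set.ofList, PySem.Set.update, PySem.Set.add,
        PySem.Set.empty, PySem.Set.contains]
  · by_cases hm : k = "movq"
    · subst hm
      simp only [beq_iff_eq, reduceIte]
      by_cases h1 : a1 = "var" <;> by_cases h2 : a2 = "var" <;>
        simp [h1, h2, hk, diff_nil, diff_singleton, PySem.Set.union, PySem.Set.ofList,
          PySem.Set.update, PySem.Set.add, PySem.Set.empty]
    · simp [hk, hm, diff_nil, PySem.Set.union, PySem.Set.ofList, PySem.Set.empty]

-- A's fold over the reversed tail, characterised by liveRef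
theorem afold (l : List (String × (String × String) × (String × String))) :
    l.reverse.foldl stepA (PySem.Set.empty, [PySem.Set.empty]) =
      ((liveRef l).headD [], (liveRef l).reverse) := by
  induction l with
  | nil => rfl
  | cons op rest ih =>
    rw [List.reverse_cons, List.foldl_append, ih]
    simp only [List.foldl_cons, List.foldl_nil, stepA_eq]
    simp [liveRef]

theorem cal_liveness_eq_ref (op_lst : List (String × (String × String) × (String × String))) :
    cal_liveness op_lst = (liveRef op_lst.tail).reverse.reverse := by
  unfold cal_liveness
  rw [slice_rev_tail]
  simp only [Option.getD_some]
  rw [afold]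

-- B's fold-right recursion over the compiled transfers, characterised by liveRef
theorem chain_map_genKill (l : List (String × (String × String) × (String × String))) :
    chain (l.map genKill) = liveRef l := by
  induction l with
  | nil => rfl
  | cons op rest ih =>
    simp only [List.map_cons, chain, ih, liveRef, transB]
    rfl

theorem cal_liveness_alt_eq_ref (op_lst : List (String × (String × String) × (String × String))) :
    cal_liveness_alt op_lst = liveRef op_lst.tail := by
  unfold cal_liveness_alt
  rw [PySem.List.slice_from_one]
  exact chain_map_genKill _

-- ===== VERDICT (by name: the statement is the Claim_ definition above) =====
theorem cal_liveness_spec : Claim_equal_cal_liveness := by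
  intro op_lst _
  unfold Spec_cal_liveness
  rw [cal_liveness_eq_ref, cal_liveness_alt_eq_ref, List.reverse_reverse]
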